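-- pv_equiv track=rewrite | github.com/Kyoung-yeon99/Jump_to_Algorithm | Jump_to_Algorithm2/week22/KyoungyeonJu/석유 시추.py | solution
-- ===== SOURCE A (Python) =====
-- from collections import deque
--
-- def solution(land):
--     def bfs(i, j):  # 하나의 석유 덩어리가 차지하는 열과 석유량 return
--         dx, dy = [-1, 1, 0, 0], [0, 0, -1, 1]
--         cnt = 0  # 석유량 계산
--         visited[i][j] = True
--         cols = {j}  # 해당 석유 덩어리가 자치하는 열, 중복 제거를 위해 set 활용
--         q = deque()
--         q.append([i, j])
--
--         while q:
--             r, c = q.popleft()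
--             cnt += 1
--             for a in range(4):
--                 nr, nc = r + dx[a], c + dy[a]
--                 if 0 <= nr < n and 0 <= nc < m:
--                     if land[nr][nc] == 1 and not visited[nr][nc]:
--                         cols.add(nc)  # 석유가 자치하는 column 추가
--                         q.append((nr, nc))
--                         visited[nr][nc] = True
--
--         return cols, cnt
--
--     n, m = len(land), len(land[0])
--     columns = [0] * m  # 각 열에서 시추할 수 있는 석유량
--     visited = [[False] * m for _ in range(n)]
--
--     for i in range(n):
--         for j in range(m):
--             if land[i][j] == 1 and not visited[i][j]:
--                 cols, cnt = bfs(i, j)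
--                 for c in cols:
--                     columns[c] += cnt
--
--     return max(columns)
-- ===== SOURCE B (Python) =====
-- def solution(land):
--     n, m = len(land), len(land[0])
--
--     def component(i, j):
--         # grow the set of cells connected to (i, j) by whole-grid saturation
--         # until it reaches a fixpoint (no queue, no visited matrix)
--         s = {(i, j)}
--         while True:
--             grown = {(r, c)
--                      for r in range(n) for c in range(m)
--                      if land[r][c] == 1 and ((r, c) in s or (r - 1, c) in s or
--                         (r + 1, c) in s or (r, c - 1) in s or (r, c + 1) in s)}
--             if grown == s:
--                 return s
--             s = grown
--
--     seen = set()
--     columns = [0] * m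
--     for i in range(n):
--         for j in range(m):
--             if land[i][j] == 1 and (i, j) not in seen:
--                 comp = component(i, j)
--                 seen |= comp
--                 size = len(comp)
--                 for c in {c for _, c in comp}:
--                     columns[c] += size
--     return max(columns)
-- ===== Notes on version B (the rewrite author's own statement) =====
-- stated objective: alternative
-- what changed: Replaces the per-blob BFS with a mutable visited matrix and deque by a whole-grid fixpoint saturation: each component is grown as a set by repeatedly recomputing the set of oil cells equal or 4-adjacent to it until it stabilises, with a seen-set instead of the boolean matrix.
-- outside the precondition, e.g. on solution([]): A raises IndexError, B raises IndexError; on solution([[0, 0], [5]]): A raises IndexError, B raises IndexError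
import Mathlib
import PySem

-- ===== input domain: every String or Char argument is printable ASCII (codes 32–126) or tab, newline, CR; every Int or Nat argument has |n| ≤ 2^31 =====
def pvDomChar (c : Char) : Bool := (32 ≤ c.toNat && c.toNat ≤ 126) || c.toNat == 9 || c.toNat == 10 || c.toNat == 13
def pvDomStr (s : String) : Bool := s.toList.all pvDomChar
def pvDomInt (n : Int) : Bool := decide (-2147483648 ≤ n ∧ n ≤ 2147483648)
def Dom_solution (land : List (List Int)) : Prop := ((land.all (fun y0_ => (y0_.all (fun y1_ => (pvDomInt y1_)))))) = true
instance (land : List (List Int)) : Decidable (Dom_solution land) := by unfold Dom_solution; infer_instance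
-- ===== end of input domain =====

-- B replaces A's per-blob BFS (deque + boolean visited matrix) by a whole-grid fixpoint
-- saturation growing each component as a set, with a seen-set instead of the matrix
-- (objective: alternative algorithm, not faster).

-- ===== PORT A =====
-- land[r][c]; the default is taken only where Python would raise IndexError (excluded by Pre_)
def pvCell (land : List (List Int)) (r c : Int) : Int :=
  PySem.List.pyGetD (PySem.List.pyGetD land r []) c 0

def pvVisGet (v : List (List Bool)) (r c : Int) : Bool :=
  PySem.List.pyGetD (PySem.List.pyGetD v r []) c false

def pvVisSet (v : List (List Bool)) (r c : Int) : List (List Bool) :=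
  PySem.List.pySetD v r (PySem.List.pySetD (PySem.List.pyGetD v r []) c true)

-- dx, dy = [-1,1,0,0], [0,0,-1,1] paired: the 'for a in range(4)' body runs once per (dx[a], dy[a])
def pvDeltas : List (Int × Int) := [(-1, 0), (1, 0), (0, -1), (0, 1)]

-- one iteration of the 'for a in range(4)' body; state = (cols, q, visited)
def pvStep (land : List (List Int)) (n m r c : Int)
    (st : PySem.Set Int × List (Int × Int) × List (List Bool)) (d : Int × Int) :
    PySem.Set Int × List (Int × Int) × List (List Bool) :=
  let nr := r + d.1
  let nc := c + d.2
  if 0 ≤ nr ∧ nr < n ∧ 0 ≤ nc ∧ nc < m then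
    if pvCell land nr nc == 1 && !pvVisGet st.2.2 nr nc then
      (PySem.Set.add st.1 nc, st.2.1 ++ [(nr, nc)], pvVisSet st.2.2 nr nc)
    else st
  else st

-- the 'while q:' loop; fuel n*m+1 is enough: each dequeued cell was enqueued exactly once
def pvBfsLoop (land : List (List Int)) (n m : Int) :
    Nat → List (Int × Int) → PySem.Set Int → Int → List (List Bool) →
    PySem.Set Int × Int × List (List Bool)
  | _, [], cols, cnt, v => (cols, cnt, v)
  | 0, _ :: _, cols, cnt, v => (cols, cnt, v)
  | fuel + 1, (r, c) :: q, cols, cnt, v =>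
      let st := pvDeltas.foldl (pvStep land n m r c) (cols, q, v)
      pvBfsLoop land n m fuel st.2.1 st.1 (cnt + 1) st.2.2

def pvBfs (land : List (List Int)) (n m i j : Int) (v : List (List Bool)) :
    PySem.Set Int × Int × List (List Bool) :=
  pvBfsLoop land n m (n.toNat * m.toNat + 1) [(i, j)] (PySem.Set.add PySem.Set.empty j) 0
    (pvVisSet v i j)

-- 'columns[c] += cnt'
def pvColsAdd (cnt : Int) (cols : List Int) (col : Int) : List Int :=
  PySem.List.pySetD cols col (PySem.List.pyGetD cols col 0 + cnt)

-- the body of A's double loop; state = (columns, visited)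
def pvBodyA (land : List (List Int)) (n m : Int) (st : List Int × List (List Bool))
    (i j : Int) : List Int × List (List Bool) :=
  if pvCell land i j == 1 && !pvVisGet st.2 i j then
    let r := pvBfs land n m i j st.2
    -- 'for c in cols: columns[c] += cnt' — a fold over the set; the result is order-independent
    (r.1.foldl (pvColsAdd r.2.1) st.1, r.2.2)
  else st

def solution (land : List (List Int)) : Int :=
  let n := PySem.List.len land
  let m := PySem.List.len (PySem.List.pyGetD land 0 [])
  let columns : List Int := List.replicate m.toNat 0
  let visited : List (List Bool) := List.replicate n.toNat (List.replicate m.toNat false)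
  let fin := (PySem.List.pyRange 0 n 1).foldl (fun st i =>
    (PySem.List.pyRange 0 m 1).foldl (fun st j => pvBodyA land n m st i j) st)
    (columns, visited)
  (PySem.List.max? fin.1 (fun x => x)).getD 0

-- ===== PORT B =====
def pvNbr (s : PySem.Set (Int × Int)) (r c : Int) : Bool :=
  PySem.Set.contains s (r, c) || PySem.Set.contains s (r - 1, c) ||
  PySem.Set.contains s (r + 1, c) || PySem.Set.contains s (r, c - 1) ||
  PySem.Set.contains s (r, c + 1)

-- the 'grown = {...}' set comprehension, row-major
def pvGrow (land : List (List Int)) (n m : Int) (s : PySem.Set (Int × Int)) :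
    PySem.Set (Int × Int) :=
  PySem.Set.ofList ((PySem.List.pyRange 0 n 1).flatMap (fun r =>
    (PySem.List.pyRange 0 m 1).filterMap (fun c =>
      if pvCell land r c == 1 && pvNbr s r c then some (r, c) else none)))

-- the 'while True' loop; the set grows strictly until the fixpoint, so n*m+1 rounds suffice
def pvComponent (land : List (List Int)) (n m : Int) :
    Nat → PySem.Set (Int × Int) → PySem.Set (Int × Int)
  | 0, s => s
  | fuel + 1, s =>
      let g := pvGrow land n m s
      if PySem.Set.equal g s then s else pvComponent land n m fuel g

-- the body of B's double loop; state = (columns, seen)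
def pvBodyB (land : List (List Int)) (n m : Int)
    (st : List Int × PySem.Set (Int × Int)) (i j : Int) :
    List Int × PySem.Set (Int × Int) :=
  if pvCell land i j == 1 && !PySem.Set.contains st.2 (i, j) then
    let comp := pvComponent land n m (n.toNat * m.toNat + 1)
      (PySem.Set.add PySem.Set.empty (i, j))
    let size := PySem.Set.len comp
    ((PySem.Set.ofList (comp.map (fun p => p.2))).foldl (pvColsAdd size) st.1,
     PySem.Set.union st.2 comp)
  else st

def solution_alt (land : List (List Int)) : Int :=
  let n := PySem.List.len land
  let m := PySem.List.len (PySem.List.pyGetD land 0 [])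
  let columns : List Int := List.replicate m.toNat 0
  let fin := (PySem.List.pyRange 0 n 1).foldl (fun st i =>
    (PySem.List.pyRange 0 m 1).foldl (fun st j => pvBodyB land n m st i j) st)
    (columns, (PySem.Set.empty : PySem.Set (Int × Int)))
  (PySem.List.max? fin.1 (fun x => x)).getD 0

-- ===== PRECONDITION & SPEC =====
-- Pre_ excludes exactly the inputs where A raises: an empty land (IndexError), an empty
-- first row (ValueError from max([])), or a row shorter than len(land[0]) (IndexError).
def Pre_solution (land : List (List Int)) : Prop :=
  land ≠ [] ∧ 0 < (land.headD []).length ∧ ∀ row ∈ land, (land.headD []).length ≤ row.length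
instance (land : List (List Int)) : Decidable (Pre_solution land) := by
  unfold Pre_solution; infer_instance

def pvWitness_solution : List (List Int) := [[1, 0], [0, 1]]

def Spec_solution (land : List (List Int)) (out : Int) : Prop := out = solution_alt land
instance (land : List (List Int)) (out : Int) : Decidable (Spec_solution land out) := by
  unfold Spec_solution; infer_instance

-- ===== CLAIM (what is proved, stated in full; the proofs are below) =====
def Claim_equal_solution : Prop :=
  ∀ (land : List (List Int)), Dom_solution land → Pre_solution land →
    Spec_solution land (solution land)

-- ===== LEMMAS AND PROOFS =====

/-- cell p is inside the n×m grid -/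
abbrev pvInb (n m : Int) (p : Int × Int) : Prop :=
  0 ≤ p.1 ∧ p.1 < n ∧ 0 ≤ p.2 ∧ p.2 < m

/-- cell p is an in-bounds oil cell -/
def pvOil (land : List (List Int)) (n m : Int) (p : Int × Int) : Prop :=
  pvInb n m p ∧ pvCell land p.1 p.2 = 1

/-- q is one of the four lateral neighbours of p -/
def pvAdj (p q : Int × Int) : Prop :=
  (q.1 = p.1 - 1 ∧ q.2 = p.2) ∨ (q.1 = p.1 + 1 ∧ q.2 = p.2) ∨
  (q.1 = p.1 ∧ q.2 = p.2 - 1) ∨ (q.1 = p.1 ∧ q.2 = p.2 + 1)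

/-- T absorbs every in-bounds oil neighbour of its members -/
def pvClosed (land : List (List Int)) (n m : Int) (T : Int × Int → Prop) : Prop :=
  ∀ p, T p → ∀ q, pvAdj p q → pvOil land n m q → T q

theorem pvAdj_symm {p q : Int × Int} (h : pvAdj p q) : pvAdj q p := by
  rcases h with ⟨h1, h2⟩ | ⟨h1, h2⟩ | ⟨h1, h2⟩ | ⟨h1, h2⟩
  · exact Or.inr (Or.inl ⟨by omega, by omega⟩)
  · exact Or.inl ⟨by omega, by omega⟩
  · exact Or.inr (Or.inr (Or.inr ⟨by omega, by omega⟩))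
  · exact Or.inr (Or.inr (Or.inl ⟨by omega, by omega⟩))


theorem pvComponent_zero (land : List (List Int)) (n m : Int) (s : PySem.Set (Int × Int)) :
    pvComponent land n m 0 s = s := rfl

theorem pvComponent_succ (land : List (List Int)) (n m : Int) (fuel : Nat)
    (s : PySem.Set (Int × Int)) :
    pvComponent land n m (fuel + 1) s =
      if PySem.Set.equal (pvGrow land n m s) s = true then s
      else pvComponent land n m fuel (pvGrow land n m s) := rfl

theorem pvBfsLoop_nil (land : List (List Int)) (n m : Int) (fuel : Nat)
    (cols : PySem.Set Int) (cnt : Int) (v : List (List Bool)) :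
    pvBfsLoop land n m fuel [] cols cnt v = (cols, cnt, v) := by
  cases fuel <;> rfl

theorem pvBfsLoop_succ_cons (land : List (List Int)) (n m : Int) (fuel : Nat)
    (r c : Int) (q : List (Int × Int)) (cols : PySem.Set Int) (cnt : Int)
    (v : List (List Bool)) :
    pvBfsLoop land n m (fuel + 1) ((r, c) :: q) cols cnt v =
      pvBfsLoop land n m fuel
        ((pvDeltas.foldl (pvStep land n m r c) (cols, q, v)).2.1)
        ((pvDeltas.foldl (pvStep land n m r c) (cols, q, v)).1) (cnt + 1)
        ((pvDeltas.foldl (pvStep land n m r c) (cols, q, v)).2.2) := rfl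

theorem pvSetLen {α : Type} (s : PySem.Set α) : PySem.Set.len s = (s.length : Int) := by
  simp [PySem.Set.len]

theorem pvAdj_iff_delta {r c : Int} {a : Int × Int} :
    (∃ d ∈ pvDeltas, a = (r + d.1, c + d.2)) ↔ pvAdj (r, c) a := by
  obtain ⟨a1, a2⟩ := a
  constructor
  · rintro ⟨d, hd, hEq⟩
    simp only [pvDeltas, List.mem_cons, List.not_mem_nil, or_false] at hd
    rcases hd with rfl | rfl | rfl | rfl <;>
      simp only [Prod.mk.injEq] at hEq <;>
      [exact Or.inl ⟨by omega, by omega⟩;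
       exact Or.inr (Or.inl ⟨by omega, by omega⟩);
       exact Or.inr (Or.inr (Or.inl ⟨by omega, by omega⟩));
       exact Or.inr (Or.inr (Or.inr ⟨by omega, by omega⟩))]
  · rintro (⟨h1, h2⟩ | ⟨h1, h2⟩ | ⟨h1, h2⟩ | ⟨h1, h2⟩)
    · exact ⟨(-1, 0), by simp [pvDeltas], by simp only [Prod.mk.injEq]; omega⟩
    · exact ⟨(1, 0), by simp [pvDeltas], by simp only [Prod.mk.injEq]; omega⟩
    · exact ⟨(0, -1), by simp [pvDeltas], by simp only [Prod.mk.injEq]; omega⟩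
    · exact ⟨(0, 1), by simp [pvDeltas], by simp only [Prod.mk.injEq]; omega⟩

theorem mem_pvGrow {land : List (List Int)} {n m : Int} {s : PySem.Set (Int × Int)}
    {p : Int × Int} :
    p ∈ pvGrow land n m s ↔ pvOil land n m p ∧ (p ∈ s ∨ ∃ q ∈ s, pvAdj p q) := by
  obtain ⟨p1, p2⟩ := p
  unfold pvGrow
  rw [PySem.Set.mem_ofList]
  simp only [List.mem_flatMap, List.mem_filterMap, PySem.List.mem_pyRange_one]
  constructor
  · rintro ⟨r, ⟨hr0, hrn⟩, c, ⟨hc0, hcm⟩, hif⟩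
    by_cases hb : (pvCell land r c == 1 && pvNbr s r c) = true
    · rw [if_pos hb] at hif
      obtain ⟨rfl, rfl⟩ : r = p1 ∧ c = p2 := by
        have := Option.some.inj hif; exact ⟨congrArg Prod.fst this, congrArg Prod.snd this⟩
      simp only [Bool.and_eq_true, beq_iff_eq, pvNbr, Bool.or_eq_true,
        PySem.Set.contains_iff] at hb
      refine ⟨⟨⟨hr0, hrn, hc0, hcm⟩, hb.1⟩, ?_⟩
      rcases hb.2 with (((h | h) | h) | h) | h
      · exact Or.inl h
      · exact Or.inr ⟨(r - 1, c), h, Or.inl ⟨rfl, rfl⟩⟩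
      · exact Or.inr ⟨(r + 1, c), h, Or.inr (Or.inl ⟨rfl, rfl⟩)⟩
      · exact Or.inr ⟨(r, c - 1), h, Or.inr (Or.inr (Or.inl ⟨rfl, rfl⟩))⟩
      · exact Or.inr ⟨(r, c + 1), h, Or.inr (Or.inr (Or.inr ⟨rfl, rfl⟩))⟩
    · rw [if_neg hb] at hif; cases hif
  · rintro ⟨⟨⟨h1, h2, h3, h4⟩, hcell⟩, hor⟩
    refine ⟨p1, ⟨h1, h2⟩, p2, ⟨h3, h4⟩, ?_⟩
    have hnbr : pvNbr s p1 p2 = true := by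
      unfold pvNbr
      simp only [Bool.or_eq_true, PySem.Set.contains_iff]
      rcases hor with h | ⟨⟨q1, q2⟩, hq, hadj⟩
      · tauto
      · rcases hadj with ⟨e1, e2⟩ | ⟨e1, e2⟩ | ⟨e1, e2⟩ | ⟨e1, e2⟩ <;>
          simp only at e1 e2
        · have hm : (p1 - 1, p2) ∈ s := by
            have he : (p1 - 1, p2) = (q1, q2) := by simp only [Prod.mk.injEq]; omega
            rwa [he]
          tauto
        · have hm : (p1 + 1, p2) ∈ s := by
            have he : (p1 + 1, p2) = (q1, q2) := by simp only [Prod.mk.injEq]; omega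
            rwa [he]
          tauto
        · have hm : (p1, p2 - 1) ∈ s := by
            have he : (p1, p2 - 1) = (q1, q2) := by simp only [Prod.mk.injEq]; omega
            rwa [he]
          tauto
        · have hm : (p1, p2 + 1) ∈ s := by
            have he : (p1, p2 + 1) = (q1, q2) := by simp only [Prod.mk.injEq]; omega
            rwa [he]
          tauto
    rw [if_pos (by simp [hcell, hnbr])]

theorem pvGrow_nodup (land : List (List Int)) (n m : Int) (s : PySem.Set (Int × Int)) :
    (pvGrow land n m s).Nodup := PySem.Set.nodup_ofList _

theorem subset_pvGrow {land : List (List Int)} {n m : Int} {s : PySem.Set (Int × Int)}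
    (hs : ∀ p ∈ s, pvOil land n m p) : ∀ p ∈ s, p ∈ pvGrow land n m s := by
  intro p hp
  exact mem_pvGrow.mpr ⟨hs p hp, Or.inl hp⟩

theorem pvComponent_subset {land : List (List Int)} {n m : Int}
    {T : Int × Int → Prop} (hT : pvClosed land n m T) :
    ∀ (fuel : Nat) (s : PySem.Set (Int × Int)), (∀ p ∈ s, T p) →
      ∀ p ∈ pvComponent land n m fuel s, T p := by
  intro fuel
  induction fuel with
  | zero => intro s hs p hp; rw [pvComponent_zero] at hp; exact hs p hp
  | succ fuel ih =>
    intro s hs p hp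
    rw [pvComponent_succ] at hp
    by_cases he : PySem.Set.equal (pvGrow land n m s) s = true
    · rw [if_pos he] at hp; exact hs p hp
    · rw [if_neg he] at hp
      refine ih (pvGrow land n m s) ?_ p hp
      intro a ha
      rcases mem_pvGrow.mp ha with ⟨hoil, h | ⟨q, hq, hadj⟩⟩
      · exact hs a h
      · exact hT q (hs q hq) a (pvAdj_symm hadj) hoil

theorem pvComponent_oil {land : List (List Int)} {n m : Int} :
    ∀ (fuel : Nat) (s : PySem.Set (Int × Int)), (∀ p ∈ s, pvOil land n m p) →
      ∀ p ∈ pvComponent land n m fuel s, pvOil land n m p := by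
  intro fuel
  induction fuel with
  | zero => intro s hs p hp; rw [pvComponent_zero] at hp; exact hs p hp
  | succ fuel ih =>
    intro s hs p hp
    rw [pvComponent_succ] at hp
    by_cases he : PySem.Set.equal (pvGrow land n m s) s = true
    · rw [if_pos he] at hp; exact hs p hp
    · rw [if_neg he] at hp
      exact ih (pvGrow land n m s) (fun a ha => (mem_pvGrow.mp ha).1) p hp

theorem pvComponent_mem {land : List (List Int)} {n m : Int} :
    ∀ (fuel : Nat) (s : PySem.Set (Int × Int)), (∀ p ∈ s, pvOil land n m p) →
      ∀ p ∈ s, p ∈ pvComponent land n m fuel s := by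
  intro fuel
  induction fuel with
  | zero => intro s _ p hp; rw [pvComponent_zero]; exact hp
  | succ fuel ih =>
    intro s hs p hp
    rw [pvComponent_succ]
    by_cases he : PySem.Set.equal (pvGrow land n m s) s = true
    · rw [if_pos he]; exact hp
    · rw [if_neg he]
      exact ih (pvGrow land n m s) (fun a ha => (mem_pvGrow.mp ha).1) p
        (subset_pvGrow hs p hp)

theorem pvComponent_nodup {land : List (List Int)} {n m : Int} :
    ∀ (fuel : Nat) (s : PySem.Set (Int × Int)), s.Nodup →
      (pvComponent land n m fuel s).Nodup := by
  intro fuel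
  induction fuel with
  | zero => intro s hs; rw [pvComponent_zero]; exact hs
  | succ fuel ih =>
    intro s hs
    rw [pvComponent_succ]
    by_cases he : PySem.Set.equal (pvGrow land n m s) s = true
    · rw [if_pos he]; exact hs
    · rw [if_neg he]; exact ih (pvGrow land n m s) (pvGrow_nodup _ _ _ _)

theorem length_le_grid {n m : Int} {s : List (Int × Int)} (hnd : s.Nodup)
    (hb : ∀ p ∈ s, pvInb n m p) : s.length ≤ n.toNat * m.toNat := by
  classical
  have h1 : s.toFinset.card = s.length := List.toFinset_card_of_nodup hnd
  have hsub : s.toFinset ⊆ (Finset.range n.toNat ×ˢ Finset.range m.toNat).image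
      (fun q : ℕ × ℕ => ((q.1 : Int), (q.2 : Int))) := by
    intro p hp
    obtain ⟨h1', h2', h3', h4'⟩ := hb p (List.mem_toFinset.mp hp)
    refine Finset.mem_image.mpr ⟨(p.1.toNat, p.2.toNat), ?_, ?_⟩
    · exact Finset.mem_product.mpr
        ⟨Finset.mem_range.mpr (by omega), Finset.mem_range.mpr (by omega)⟩
    · obtain ⟨p1, p2⟩ := p
      simp only [Prod.mk.injEq]
      constructor <;> omega
  have h2 := Finset.card_le_card hsub
  have h3 := Finset.card_image_le
    (s := Finset.range n.toNat ×ˢ Finset.range m.toNat)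
    (f := fun q : ℕ × ℕ => ((q.1 : Int), (q.2 : Int)))
  rw [Finset.card_product, Finset.card_range, Finset.card_range] at h3
  omega

theorem pvComponent_fixpoint {land : List (List Int)} {n m : Int} :
    ∀ (fuel : Nat) (s : PySem.Set (Int × Int)), s.Nodup → (∀ p ∈ s, pvOil land n m p) →
      n.toNat * m.toNat + 1 ≤ fuel + s.length →
      PySem.Set.equal (pvGrow land n m (pvComponent land n m fuel s))
        (pvComponent land n m fuel s) = true := by
  intro fuel
  induction fuel with
  | zero =>
    intro s hnd hoil hfl
    exfalso
    have := length_le_grid hnd (fun p hp => (hoil p hp).1)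
    omega
  | succ fuel ih =>
    intro s hnd hoil hfl
    rw [pvComponent_succ]
    by_cases he : PySem.Set.equal (pvGrow land n m s) s = true
    · rw [if_pos he]; exact he
    · rw [if_neg he]
      refine ih (pvGrow land n m s) (pvGrow_nodup _ _ _ _)
        (fun a ha => (mem_pvGrow.mp ha).1) ?_
      have hsub : ∀ p ∈ s, p ∈ pvGrow land n m s := subset_pvGrow hoil
      have hex : ∃ x, x ∈ pvGrow land n m s ∧ x ∉ s := by
        by_contra hno
        refine he ((PySem.Set.equal_iff _ _).mpr (fun x => ⟨fun h => ?_, hsub x⟩))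
        by_cases hxs : x ∈ s
        · exact hxs
        · exact absurd ⟨x, h, hxs⟩ hno
      obtain ⟨x, hxg, hxs⟩ := hex
      have hsubF : s.toFinset ⊆ (pvGrow land n m s).toFinset := by
        intro p hp
        exact List.mem_toFinset.mpr (hsub p (List.mem_toFinset.mp hp))
      have hss : s.toFinset ⊂ (pvGrow land n m s).toFinset :=
        (Finset.ssubset_iff_of_subset hsubF).mpr
          ⟨x, List.mem_toFinset.mpr hxg, fun hc => hxs (List.mem_toFinset.mp hc)⟩
      have hcard := Finset.card_lt_card hss
      rw [List.toFinset_card_of_nodup hnd,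
        List.toFinset_card_of_nodup (pvGrow_nodup _ _ _ _)] at hcard
      omega

theorem pvComponent_closed {land : List (List Int)} {n m : Int}
    {fuel : Nat} {s : PySem.Set (Int × Int)} (hnd : s.Nodup)
    (hs : ∀ p ∈ s, pvOil land n m p)
    (hfuel : n.toNat * m.toNat + 1 ≤ fuel + s.length) :
    pvClosed land n m (fun p => p ∈ pvComponent land n m fuel s) := by
  intro p hp q hadj hoil
  have hfix := pvComponent_fixpoint fuel s hnd hs hfuel
  have := (PySem.Set.equal_iff _ _).mp hfix q
  exact this.mp (mem_pvGrow.mpr ⟨hoil, Or.inr ⟨p, hp, pvAdj_symm hadj⟩⟩)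

-- visited-matrix lemmas
theorem pvVisGet_getD {v : List (List Bool)} {r c : Int} (hr : 0 ≤ r) (hc : 0 ≤ c) :
    pvVisGet v r c = (v.getD r.toNat []).getD c.toNat false := by
  unfold pvVisGet
  rw [PySem.List.pyGetD_of_nonneg _ _ hr, PySem.List.pyGetD_of_nonneg _ _ hc]

theorem pvVisSet_set {v : List (List Bool)} {r c : Int} (hr : 0 ≤ r) (hc : 0 ≤ c) :
    pvVisSet v r c = v.set r.toNat ((v.getD r.toNat []).set c.toNat true) := by
  unfold pvVisSet
  rw [PySem.List.pySetD_of_nonneg _ _ hr, PySem.List.pySetD_of_nonneg _ _ hc,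
    PySem.List.pyGetD_of_nonneg _ _ hr]

theorem pvVisGet_set_self {n m : Int} {v : List (List Bool)} {r c : Int}
    (h : pvInb n m (r, c)) (hl : v.length = n.toNat)
    (hrow : ∀ row ∈ v, row.length = m.toNat) :
    pvVisGet (pvVisSet v r c) r c = true := by
  obtain ⟨h1, h2, h3, h4⟩ := h
  simp only at h1 h2 h3 h4
  have hr : r.toNat < v.length := by omega
  have hrowlen : (v.getD r.toNat []).length = m.toNat := by
    rw [List.getD_eq_getElem _ _ hr]; exact hrow _ (List.getElem_mem hr)
  rw [pvVisSet_set h1 h3, pvVisGet_getD h1 h3]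
  have houter : (v.set r.toNat ((v.getD r.toNat []).set c.toNat true)).getD r.toNat [] =
      (v.getD r.toNat []).set c.toNat true := by
    rw [List.getD_eq_getElem?_getD, List.getElem?_set, if_pos rfl, if_pos hr]
    rfl
  rw [houter, List.getD_eq_getElem?_getD, List.getElem?_set, if_pos rfl,
    if_pos (show c.toNat < (v.getD r.toNat []).length by rw [hrowlen]; omega)]
  rfl

theorem pvVisGet_set_other {n m : Int} {v : List (List Bool)} {r c x y : Int}
    (hp : pvInb n m (r, c)) (hq : pvInb n m (x, y)) (hne : (x, y) ≠ (r, c))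
    (hl : v.length = n.toNat) :
    pvVisGet (pvVisSet v r c) x y = pvVisGet v x y := by
  obtain ⟨hp1, hp2, hp3, hp4⟩ := hp
  obtain ⟨hq1, hq2, hq3, hq4⟩ := hq
  simp only at hp1 hp2 hp3 hp4 hq1 hq2 hq3 hq4
  rw [pvVisSet_set hp1 hp3, pvVisGet_getD hq1 hq3]
  conv_rhs => rw [pvVisGet_getD hq1 hq3]
  by_cases hre : r.toNat = x.toNat
  · have houter : (v.set r.toNat ((v.getD r.toNat []).set c.toNat true)).getD x.toNat [] =
        (v.getD r.toNat []).set c.toNat true := by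
      rw [List.getD_eq_getElem?_getD, List.getElem?_set, if_pos hre,
        if_pos (show r.toNat < v.length by omega)]
      rfl
    rw [houter]
    have hq2p2 : c.toNat ≠ y.toNat := by
      intro hcon
      exact hne (by simp only [Prod.mk.injEq]; omega)
    rw [List.getD_eq_getElem?_getD, List.getElem?_set, if_neg hq2p2,
      ← List.getD_eq_getElem?_getD]
    have hpq : r = x := by omega
    rw [hpq]
  · have houter : (v.set r.toNat ((v.getD r.toNat []).set c.toNat true)).getD x.toNat [] =
        v.getD x.toNat [] := by
      rw [List.getD_eq_getElem?_getD, List.getElem?_set, if_neg hre,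
        ← List.getD_eq_getElem?_getD]
    rw [houter]

theorem pvVisSet_wf {n m : Int} {v : List (List Bool)} {r c : Int}
    (h : pvInb n m (r, c)) (hl : v.length = n.toNat)
    (hrow : ∀ row ∈ v, row.length = m.toNat) :
    (pvVisSet v r c).length = n.toNat ∧ ∀ row ∈ pvVisSet v r c, row.length = m.toNat := by
  obtain ⟨h1, h2, h3, h4⟩ := h
  simp only at h1 h2 h3 h4
  rw [pvVisSet_set h1 h3]
  refine ⟨by rw [List.length_set]; exact hl, ?_⟩
  intro row hrm
  rcases List.mem_or_eq_of_mem_set hrm with hmem | rfl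
  · exact hrow row hmem
  · rw [List.length_set]
    have hr : r.toNat < v.length := by omega
    rw [List.getD_eq_getElem _ _ hr]
    exact hrow _ (List.getElem_mem hr)

-- the cells the 'for a in range(4)' pass enqueues, read off the incoming visited matrix
def pvNewOf (land : List (List Int)) (n m r c : Int) (v : List (List Bool)) :
    List (Int × Int) → List (Int × Int)
  | [] => []
  | d :: ds =>
      if (0 ≤ r + d.1 ∧ r + d.1 < n ∧ 0 ≤ c + d.2 ∧ c + d.2 < m) ∧
          pvCell land (r + d.1) (c + d.2) = 1 ∧ pvVisGet v (r + d.1) (c + d.2) = false then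
        (r + d.1, c + d.2) :: pvNewOf land n m r c v ds
      else pvNewOf land n m r c v ds

theorem mem_pvNewOf {land : List (List Int)} {n m r c : Int} {v : List (List Bool)} :
    ∀ {ds : List (Int × Int)} {a : Int × Int},
      a ∈ pvNewOf land n m r c v ds ↔
        ∃ d ∈ ds, a = (r + d.1, c + d.2) ∧ pvInb n m a ∧ pvCell land a.1 a.2 = 1 ∧
          pvVisGet v a.1 a.2 = false := by
  intro ds
  induction ds with
  | nil => intro a; simp [pvNewOf]
  | cons d ds ih =>
    intro a
    rw [pvNewOf]
    constructor
    · intro hmem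
      split at hmem
      · rename_i hC
        rcases List.mem_cons.mp hmem with rfl | htail
        · exact ⟨d, List.mem_cons_self .., rfl, hC.1, hC.2.1, hC.2.2⟩
        · obtain ⟨d', hd', he⟩ := ih.mp htail
          exact ⟨d', List.mem_cons_of_mem _ hd', he⟩
      · obtain ⟨d', hd', he⟩ := ih.mp hmem
        exact ⟨d', List.mem_cons_of_mem _ hd', he⟩
    · rintro ⟨d', hd', rfl, hinb, hcell, hvg⟩
      rcases List.mem_cons.mp hd' with rfl | htail
      · rw [if_pos ⟨hinb, hcell, hvg⟩]
        exact List.mem_cons_self ..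
      · split
        · exact List.mem_cons_of_mem _ (ih.mpr ⟨d', htail, rfl, hinb, hcell, hvg⟩)
        · exact ih.mpr ⟨d', htail, rfl, hinb, hcell, hvg⟩

theorem nodup_pvNewOf {land : List (List Int)} {n m r c : Int} {v : List (List Bool)} :
    ∀ {ds : List (Int × Int)}, ds.Nodup → (pvNewOf land n m r c v ds).Nodup := by
  intro ds
  induction ds with
  | nil => intro _; simp [pvNewOf]
  | cons d ds ih =>
    intro hnd
    obtain ⟨hdni, hds⟩ := List.nodup_cons.mp hnd
    rw [pvNewOf]
    split
    · refine List.nodup_cons.mpr ⟨?_, ih hds⟩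
      intro hmem
      obtain ⟨d', hd', he, _⟩ := mem_pvNewOf.mp hmem
      have : d' = d := by
        obtain ⟨a, b⟩ := d
        obtain ⟨a', b'⟩ := d'
        simp only [Prod.mk.injEq] at he ⊢
        omega
      exact hdni (this ▸ hd')
    · exact ih hds

theorem pvNewOf_congr {land : List (List Int)} {n m r c : Int} {v v' : List (List Bool)} :
    ∀ {ds : List (Int × Int)},
      (∀ d ∈ ds, (0 ≤ r + d.1 ∧ r + d.1 < n ∧ 0 ≤ c + d.2 ∧ c + d.2 < m) →
        pvVisGet v (r + d.1) (c + d.2) = pvVisGet v' (r + d.1) (c + d.2)) →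
      pvNewOf land n m r c v ds = pvNewOf land n m r c v' ds := by
  intro ds
  induction ds with
  | nil => intro _; rfl
  | cons d ds ih =>
    intro h
    rw [pvNewOf, pvNewOf]
    have htail := ih (fun d' hd' => h d' (List.mem_cons_of_mem _ hd'))
    by_cases hI : 0 ≤ r + d.1 ∧ r + d.1 < n ∧ 0 ≤ c + d.2 ∧ c + d.2 < m
    · rw [h d (List.mem_cons_self ..) hI, htail]
    · rw [if_neg (fun hc => hI hc.1), if_neg (fun hc => hI hc.1), htail]

set_option maxHeartbeats 1000000 in
theorem pvScan_spec (land : List (List Int)) (n m r c : Int) :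
    ∀ (ds : List (Int × Int)), ds.Nodup →
      ∀ (cols : PySem.Set Int) (q : List (Int × Int)) (v : List (List Bool)),
        v.length = n.toNat → (∀ row ∈ v, row.length = m.toNat) → cols.Nodup →
        (ds.foldl (pvStep land n m r c) (cols, q, v)).2.1 =
            q ++ pvNewOf land n m r c v ds ∧
          (ds.foldl (pvStep land n m r c) (cols, q, v)).2.2.length = n.toNat ∧
          (∀ row ∈ (ds.foldl (pvStep land n m r c) (cols, q, v)).2.2,
            row.length = m.toNat) ∧
          (∀ p : Int × Int, pvInb n m p →
            (pvVisGet (ds.foldl (pvStep land n m r c) (cols, q, v)).2.2 p.1 p.2 = true ↔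
              (pvVisGet v p.1 p.2 = true ∨ p ∈ pvNewOf land n m r c v ds))) ∧
          (ds.foldl (pvStep land n m r c) (cols, q, v)).1.Nodup ∧
          (∀ x, x ∈ (ds.foldl (pvStep land n m r c) (cols, q, v)).1 ↔
            x ∈ cols ∨ ∃ a ∈ pvNewOf land n m r c v ds, a.2 = x) := by
  intro ds
  induction ds with
  | nil =>
    intro _ cols q v hl hrow hcols
    refine ⟨by simp [pvNewOf], hl, hrow, ?_, hcols, ?_⟩
    · intro p _; simp [pvNewOf]
    · intro x; simp [pvNewOf]
  | cons d ds ih =>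
    intro hnd cols q v hl hrow hcols
    obtain ⟨hdni, hds⟩ := List.nodup_cons.mp hnd
    rw [List.foldl_cons]
    by_cases hC : (0 ≤ r + d.1 ∧ r + d.1 < n ∧ 0 ≤ c + d.2 ∧ c + d.2 < m) ∧
        pvCell land (r + d.1) (c + d.2) = 1 ∧ pvVisGet v (r + d.1) (c + d.2) = false
    · have hstep : pvStep land n m r c (cols, q, v) d =
          (PySem.Set.add cols (c + d.2), q ++ [(r + d.1, c + d.2)],
            pvVisSet v (r + d.1) (c + d.2)) := by
        unfold pvStep
        rw [if_pos hC.1, if_pos (by simp [hC.2.1, hC.2.2])]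
      rw [hstep]
      have hinb : pvInb n m (r + d.1, c + d.2) := hC.1
      obtain ⟨hl1, hrow1⟩ :=
        pvVisSet_wf (n := n) (m := m) (v := v) hinb hl hrow
      have hvis1 : ∀ p : Int × Int, pvInb n m p →
          (pvVisGet (pvVisSet v (r + d.1) (c + d.2)) p.1 p.2 = true ↔
            (pvVisGet v p.1 p.2 = true ∨ p = (r + d.1, c + d.2))) := by
        rintro ⟨x, y⟩ hp
        by_cases hpa : (x, y) = ((r + d.1 : Int), (c + d.2 : Int))
        · obtain ⟨hx, hy⟩ := Prod.mk.injEq .. ▸ hpa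
          subst hx
          subst hy
          simp only
          rw [pvVisGet_set_self hinb hl hrow]
          simp
        · simp only
          rw [pvVisGet_set_other (n := n) (m := m) hinb hp hpa hl]
          simp [hpa]
      have hnew1 : pvNewOf land n m r c (pvVisSet v (r + d.1) (c + d.2)) ds =
          pvNewOf land n m r c v ds := by
        refine pvNewOf_congr ?_
        intro d' hd' hI'
        refine pvVisGet_set_other (n := n) (m := m) hinb hI' ?_ hl
        intro hcon
        apply hdni
        have hdd : d' = d := by
          obtain ⟨a, b⟩ := d
          obtain ⟨a', b'⟩ := d'
          simp only [Prod.mk.injEq] at hcon ⊢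
          omega
        rwa [hdd] at hd'
      obtain ⟨hq', hl', hrow', hvis', hcolsnd', hcolsm'⟩ :=
        ih hds (PySem.Set.add cols (c + d.2)) (q ++ [(r + d.1, c + d.2)])
          (pvVisSet v (r + d.1) (c + d.2)) hl1 hrow1 (PySem.Set.nodup_add _ _ hcols)
      have hconsEq : pvNewOf land n m r c v (d :: ds) =
          (r + d.1, c + d.2) :: pvNewOf land n m r c v ds := by
        rw [pvNewOf, if_pos hC]
      refine ⟨?_, hl', hrow', ?_, hcolsnd', ?_⟩
      · rw [hq', hnew1, hconsEq]
        simp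
      · intro p hp
        rw [hvis' p hp, hnew1, hvis1 p hp, hconsEq]
        simp only [List.mem_cons]
        tauto
      · intro x
        rw [hcolsm' x, hnew1, hconsEq]
        simp only [PySem.Set.mem_add, List.mem_cons]
        constructor
        · rintro ((hx | rfl) | ⟨a, ha, rfl⟩)
          · exact Or.inl hx
          · exact Or.inr ⟨(r + d.1, c + d.2), Or.inl rfl, rfl⟩
          · exact Or.inr ⟨a, Or.inr ha, rfl⟩
        · rintro (hx | ⟨a, rfl | ha, rfl⟩)
          · exact Or.inl (Or.inl hx)
          · exact Or.inl (Or.inr rfl)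
          · exact Or.inr ⟨a, ha, rfl⟩
    · have hstep : pvStep land n m r c (cols, q, v) d = (cols, q, v) := by
        unfold pvStep
        by_cases hI : 0 ≤ r + d.1 ∧ r + d.1 < n ∧ 0 ≤ c + d.2 ∧ c + d.2 < m
        · rw [if_pos hI, if_neg]
          intro hcon
          simp only [Bool.and_eq_true, beq_iff_eq, Bool.not_eq_eq_eq_not,
            Bool.not_true] at hcon
          exact hC ⟨hI, hcon.1, hcon.2⟩
        · rw [if_neg hI]
      rw [hstep]
      have hconsEq : pvNewOf land n m r c v (d :: ds) = pvNewOf land n m r c v ds := by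
        rw [pvNewOf, if_neg hC]
      rw [hconsEq]
      exact ih hds cols q v hl hrow hcols

theorem pvBfsLoop_term (land : List (List Int)) (n m : Int) (K : Finset (Int × Int))
    (W : Int × Int → Prop) (start : Int × Int)
    (hKmin : ∀ T : Int × Int → Prop, T start → pvClosed land n m T → ∀ p ∈ K, T p)
    (hWclosed : pvClosed land n m W)
    (hWK : ∀ p ∈ K, ¬ W p)
    (fuel : Nat) (cols : PySem.Set Int) (cnt : Int) (v : List (List Bool))
    (M : Finset (Int × Int))
    (hMK : ∀ p ∈ M, p ∈ K) (hstart : start ∈ M)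
    (hproc : ∀ p ∈ M, ∀ a, pvAdj p a → pvOil land n m a → (W a ∨ a ∈ M))
    (hvis : ∀ p : Int × Int, pvInb n m p → (pvVisGet v p.1 p.2 = true ↔ (W p ∨ p ∈ M)))
    (hl : v.length = n.toNat) (hrow : ∀ row ∈ v, row.length = m.toNat)
    (hcnt : cnt = (M.card : Int))
    (hcolsnd : cols.Nodup) (hcolsm : ∀ x, x ∈ cols ↔ ∃ p ∈ M, p.2 = x) :
    (pvBfsLoop land n m fuel [] cols cnt v).2.1 = (K.card : Int) ∧
      (pvBfsLoop land n m fuel [] cols cnt v).1.Nodup ∧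
      (∀ x, x ∈ (pvBfsLoop land n m fuel [] cols cnt v).1 ↔ ∃ p ∈ K, p.2 = x) ∧
      (pvBfsLoop land n m fuel [] cols cnt v).2.2.length = n.toNat ∧
      (∀ row ∈ (pvBfsLoop land n m fuel [] cols cnt v).2.2, row.length = m.toNat) ∧
      (∀ p : Int × Int, pvInb n m p →
        (pvVisGet (pvBfsLoop land n m fuel [] cols cnt v).2.2 p.1 p.2 = true ↔
          (W p ∨ p ∈ K))) := by
  have hTclosed : pvClosed land n m (fun x => W x ∨ x ∈ M) := by
    intro x hx a hadj hoil
    rcases hx with hW | hM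
    · exact Or.inl (hWclosed x hW a hadj hoil)
    · exact hproc x hM a hadj hoil
  have hMK' : M = K := by
    apply Finset.Subset.antisymm
    · intro p hp; exact hMK p hp
    · intro p hp
      rcases hKmin (fun x => W x ∨ x ∈ M) (Or.inr hstart) hTclosed p hp with hW | hM
      · exact absurd hW (hWK p hp)
      · exact hM
  subst hMK'
  rw [pvBfsLoop_nil]
  exact ⟨hcnt, hcolsnd, hcolsm, hl, hrow, hvis⟩

theorem pvBfsLoop_spec (land : List (List Int)) (n m : Int) (K : Finset (Int × Int))
    (W : Int × Int → Prop) (start : Int × Int)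
    (hKclosed : pvClosed land n m (fun p => p ∈ K))
    (hKmin : ∀ T : Int × Int → Prop, T start → pvClosed land n m T → ∀ p ∈ K, T p)
    (hWclosed : pvClosed land n m W)
    (hWK : ∀ p ∈ K, ¬ W p) :
    ∀ (fuel : Nat) (q : List (Int × Int)) (cols : PySem.Set Int) (cnt : Int)
      (v : List (List Bool)) (M : Finset (Int × Int)),
      (∀ p ∈ M, p ∈ K) → start ∈ M →
      (∀ p ∈ q, p ∈ M) → q.Nodup →
      (∀ p ∈ M, p ∉ q → ∀ a, pvAdj p a → pvOil land n m a → (W a ∨ a ∈ M)) →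
      (∀ p : Int × Int, pvInb n m p → (pvVisGet v p.1 p.2 = true ↔ (W p ∨ p ∈ M))) →
      v.length = n.toNat → (∀ row ∈ v, row.length = m.toNat) →
      cnt = (M.card : Int) - q.length →
      cols.Nodup → (∀ x, x ∈ cols ↔ ∃ p ∈ M, p.2 = x) →
      K.card + q.length + 1 ≤ fuel + M.card →
      (pvBfsLoop land n m fuel q cols cnt v).2.1 = (K.card : Int) ∧
        (pvBfsLoop land n m fuel q cols cnt v).1.Nodup ∧
        (∀ x, x ∈ (pvBfsLoop land n m fuel q cols cnt v).1 ↔ ∃ p ∈ K, p.2 = x) ∧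
        (pvBfsLoop land n m fuel q cols cnt v).2.2.length = n.toNat ∧
        (∀ row ∈ (pvBfsLoop land n m fuel q cols cnt v).2.2, row.length = m.toNat) ∧
        (∀ p : Int × Int, pvInb n m p →
          (pvVisGet (pvBfsLoop land n m fuel q cols cnt v).2.2 p.1 p.2 = true ↔
            (W p ∨ p ∈ K))) := by
  intro fuel
  induction fuel with
  | zero =>
    intro q cols cnt v M hMK hstart hqM hqnd hproc hvis hl hrow hcnt hcolsnd hcolsm hfuel
    cases q with
    | nil =>
      exact pvBfsLoop_term land n m K W start hKmin hWclosed hWK 0 cols cnt v M hMK hstart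
        (fun p hp a hadj hoil => hproc p hp (List.not_mem_nil) a hadj hoil)
        hvis hl hrow (by simpa using hcnt) hcolsnd hcolsm
    | cons p q' =>
      exfalso
      have hsub : M ⊆ K := fun p hp => hMK p hp
      have := Finset.card_le_card hsub
      simp only [List.length_cons] at hfuel
      omega
  | succ fuel ih =>
    intro q cols cnt v M hMK hstart hqM hqnd hproc hvis hl hrow hcnt hcolsnd hcolsm hfuel
    cases q with
    | nil =>
      exact pvBfsLoop_term land n m K W start hKmin hWclosed hWK (fuel + 1) cols cnt v M
        hMK hstart
        (fun p hp a hadj hoil => hproc p hp (List.not_mem_nil) a hadj hoil)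
        hvis hl hrow (by simpa using hcnt) hcolsnd hcolsm
    | cons p0 q' =>
      obtain ⟨r, c⟩ := p0
      rw [pvBfsLoop_succ_cons]
      have hrcM : (r, c) ∈ M := hqM _ (List.mem_cons_self ..)
      have hrcK : (r, c) ∈ K := hMK _ hrcM
      obtain ⟨hrcq', hq'nd⟩ := List.nodup_cons.mp hqnd
      obtain ⟨hscanq, hscanl, hscanrow, hscanvis, hscancolsnd, hscancolsm⟩ :=
        pvScan_spec land n m r c pvDeltas (by decide) cols q' v hl hrow hcolsnd
      set new := pvNewOf land n m r c v pvDeltas with hnewdef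
      have hnewch : ∀ a : Int × Int, a ∈ new ↔
          pvAdj (r, c) a ∧ pvOil land n m a ∧ ¬ W a ∧ a ∉ M := by
        intro a
        rw [hnewdef, mem_pvNewOf]
        constructor
        · rintro ⟨d, hd, rfl, hinb, hcell, hvg⟩
          have hadj := (pvAdj_iff_delta (r := r) (c := c)
              (a := (r + d.1, c + d.2))).mp ⟨d, hd, rfl⟩
          have hnv : ¬ (W (r + d.1, c + d.2) ∨ (r + d.1, c + d.2) ∈ M) := by
            intro hcon
            have := (hvis _ hinb).mpr hcon
            rw [hvg] at this
            cases this
          exact ⟨hadj, ⟨hinb, hcell⟩, fun h => hnv (Or.inl h), fun h => hnv (Or.inr h)⟩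
        · rintro ⟨hadj, hoil, hW, hM⟩
          obtain ⟨d, hd, rfl⟩ := pvAdj_iff_delta.mpr hadj
          refine ⟨d, hd, rfl, hoil.1, hoil.2, ?_⟩
          cases hvg : pvVisGet v (r + d.1, c + d.2).1 (r + d.1, c + d.2).2
          · rfl
          · exact absurd ((hvis _ hoil.1).mp hvg) (fun h => h.elim hW hM)
      have hnewnd : new.Nodup := nodup_pvNewOf (by decide)
      have hnewK : ∀ a ∈ new, a ∈ K := by
        intro a ha
        obtain ⟨hadj, hoil, _, _⟩ := (hnewch a).mp ha
        exact hKclosed _ hrcK a hadj hoil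
      have hnewM : ∀ a ∈ new, a ∉ M := fun a ha => ((hnewch a).mp ha).2.2.2
      classical
      set M' := M ∪ new.toFinset with hM'def
      have hdisj : Disjoint M new.toFinset :=
        Finset.disjoint_left.mpr (fun a haM ha => hnewM a (List.mem_toFinset.mp ha) haM)
      have hnewcard : M'.card = M.card + new.length := by
        rw [hM'def, Finset.card_union_of_disjoint hdisj, List.toFinset_card_of_nodup hnewnd]
      refine ih _ _ _ _ M' ?_ ?_ ?_ ?_ ?_ ?_ hscanl hscanrow ?_ hscancolsnd ?_ ?_
      · intro p hp
        rcases Finset.mem_union.mp hp with h | h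
        · exact hMK p h
        · exact hnewK p (List.mem_toFinset.mp h)
      · exact Finset.mem_union_left _ hstart
      · rw [hscanq]
        intro p hp
        rcases List.mem_append.mp hp with h | h
        · exact Finset.mem_union_left _ (hqM p (List.mem_cons_of_mem _ h))
        · exact Finset.mem_union_right _ (List.mem_toFinset.mpr h)
      · rw [hscanq]
        exact List.nodup_append.mpr ⟨hq'nd, hnewnd,
          fun a ha b hb heq => hnewM b hb (heq ▸ hqM a (List.mem_cons_of_mem _ ha))⟩
      · intro p hp hnotq a hadj hoil
        rw [hscanq] at hnotq
        rcases Finset.mem_union.mp hp with hpM | hpNew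
        · by_cases hprc : p = (r, c)
          · subst hprc
            by_cases haM : a ∈ M
            · exact Or.inr (Finset.mem_union_left _ haM)
            · by_cases haW : W a
              · exact Or.inl haW
              · exact Or.inr (Finset.mem_union_right _
                  (List.mem_toFinset.mpr ((hnewch a).mpr ⟨hadj, hoil, haW, haM⟩)))
          · have hpq : p ∉ (r, c) :: q' := by
              intro hcon
              rcases List.mem_cons.mp hcon with he | hq'
              · exact hprc he
              · exact hnotq (List.mem_append_left _ hq')
            rcases hproc p hpM hpq a hadj hoil with h | h
            · exact Or.inl h
            · exact Or.inr (Finset.mem_union_left _ h)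
        · exact absurd (List.mem_append_right _ (List.mem_toFinset.mp hpNew)) hnotq
      · intro p hp
        rw [hscanvis p hp, hvis p hp, hM'def]
        simp only [Finset.mem_union, List.mem_toFinset]
        tauto
      · rw [hscanq, List.length_append]
        simp only [List.length_cons] at hcnt
        push_cast
        push_cast at hcnt
        omega
      · intro x
        rw [hscancolsm x]
        constructor
        · rintro (hx | ⟨a, ha, rfl⟩)
          · obtain ⟨p, hpM, hpx⟩ := (hcolsm x).mp hx
            exact ⟨p, Finset.mem_union_left _ hpM, hpx⟩
          · exact ⟨a, Finset.mem_union_right _ (List.mem_toFinset.mpr ha), rfl⟩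
        · rintro ⟨p, hpM', hpx⟩
          rcases Finset.mem_union.mp hpM' with h | h
          · exact Or.inl ((hcolsm x).mpr ⟨p, h, hpx⟩)
          · exact Or.inr ⟨p, List.mem_toFinset.mp h, hpx⟩
      · rw [hscanq, List.length_append]
        simp only [List.length_cons] at hfuel
        omega

-- columns update: fold of 'columns[c] += cnt' over a nodup list of in-range columns
theorem pvColsFold_spec (cnt : Int) :
    ∀ (l : List Int), l.Nodup → ∀ (columns : List Int),
      (∀ x ∈ l, 0 ≤ x ∧ x < (columns.length : Int)) →
      (l.foldl (pvColsAdd cnt) columns).length = columns.length ∧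
        ∀ k : Nat, (l.foldl (pvColsAdd cnt) columns).getD k 0 =
          columns.getD k 0 + (if (k : Int) ∈ l then cnt else 0) := by
  intro l
  induction l with
  | nil =>
    intro _ columns _
    refine ⟨rfl, ?_⟩
    intro k
    simp
  | cons x l ih =>
    intro hnd columns hb
    obtain ⟨hxl, hl'⟩ := List.nodup_cons.mp hnd
    obtain ⟨hx0, hxlt⟩ := hb x (List.mem_cons_self ..)
    rw [List.foldl_cons]
    have hxnat : x.toNat < columns.length := by omega
    have hcols1 : pvColsAdd cnt columns x =
        columns.set x.toNat (columns.getD x.toNat 0 + cnt) := by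
      unfold pvColsAdd
      rw [PySem.List.pySetD_of_nonneg _ _ hx0, PySem.List.pyGetD_of_nonneg _ _ hx0]
    rw [hcols1]
    have hb' : ∀ y ∈ l, 0 ≤ y ∧
        y < ((columns.set x.toNat (columns.getD x.toNat 0 + cnt)).length : Int) := by
      intro y hy
      have := hb y (List.mem_cons_of_mem _ hy)
      rwa [List.length_set]
    obtain ⟨hlenIH, hgetIH⟩ := ih hl' (columns.set x.toNat (columns.getD x.toNat 0 + cnt)) hb'
    refine ⟨by rw [hlenIH, List.length_set], ?_⟩
    intro k
    rw [hgetIH k]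
    by_cases hk : k = x.toNat
    · have hkl : ((k : Nat) : Int) = x := by omega
      have hset : (columns.set x.toNat (columns.getD x.toNat 0 + cnt)).getD k 0 =
          columns.getD k 0 + cnt := by
        rw [List.getD_eq_getElem?_getD, List.getElem?_set, if_pos hk.symm, if_pos hxnat]
        simp only [Option.getD_some]
        rw [hk]
      have hnotin : (k : Int) ∉ l := by rw [hkl]; exact hxl
      rw [hset, if_neg hnotin, if_pos (by rw [hkl]; exact List.mem_cons_self ..)]
      ring
    · have hset : (columns.set x.toNat (columns.getD x.toNat 0 + cnt)).getD k 0 =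
          columns.getD k 0 := by
        rw [List.getD_eq_getElem?_getD, List.getElem?_set, if_neg (fun hc => hk hc.symm),
          ← List.getD_eq_getElem?_getD]
      rw [hset]
      have hkx : ((k : Int) ∈ x :: l) ↔ ((k : Int) ∈ l) := by
        simp only [List.mem_cons]
        constructor
        · rintro (he | h)
          · exfalso; omega
          · exact h
        · exact Or.inr
      rw [show (if ((k : Int) ∈ x :: l) then cnt else 0) =
          (if ((k : Int) ∈ l) then cnt else 0) from if_congr hkx rfl rfl]

theorem pvColsFold_eq (cnt : Int) (l₁ l₂ : List Int) (h₁ : l₁.Nodup) (h₂ : l₂.Nodup)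
    (hmem : ∀ x, x ∈ l₁ ↔ x ∈ l₂) (columns : List Int)
    (hb : ∀ x ∈ l₁, 0 ≤ x ∧ x < (columns.length : Int)) :
    l₁.foldl (pvColsAdd cnt) columns = l₂.foldl (pvColsAdd cnt) columns := by
  obtain ⟨hlen1, hget1⟩ := pvColsFold_spec cnt l₁ h₁ columns hb
  obtain ⟨hlen2, hget2⟩ := pvColsFold_spec cnt l₂ h₂ columns
    (fun x hx => hb x ((hmem x).mpr hx))
  apply List.ext_getElem (by rw [hlen1, hlen2])
  intro i hi1 hi2
  rw [← List.getD_eq_getElem _ 0 hi1, ← List.getD_eq_getElem _ 0 hi2, hget1 i, hget2 i,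
    show (if ((i : Int) ∈ l₁) then cnt else 0) = (if ((i : Int) ∈ l₂) then cnt else 0) from
      if_congr (hmem i) rfl rfl]

-- the lockstep invariant between A's (columns, visited) and B's (columns, seen)
def pvInv (land : List (List Int)) (n m : Int)
    (stA : List Int × List (List Bool)) (stB : List Int × PySem.Set (Int × Int)) : Prop :=
  stA.1 = stB.1 ∧ stA.1.length = m.toNat ∧
  stA.2.length = n.toNat ∧ (∀ row ∈ stA.2, row.length = m.toNat) ∧
  stB.2.Nodup ∧ (∀ p ∈ stB.2, pvOil land n m p) ∧
  pvClosed land n m (fun p => p ∈ stB.2) ∧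
  (∀ p : Int × Int, pvInb n m p → (pvVisGet stA.2 p.1 p.2 = true ↔ p ∈ stB.2))

theorem pvStep_inv (land : List (List Int)) (n m : Int)
    {stA : List Int × List (List Bool)} {stB : List Int × PySem.Set (Int × Int)}
    (hinv : pvInv land n m stA stB) {i j : Int}
    (hi : 0 ≤ i) (hin : i < n) (hj : 0 ≤ j) (hjm : j < m) :
    pvInv land n m (pvBodyA land n m stA i j) (pvBodyB land n m stB i j) := by
  have hinv0 := hinv
  obtain ⟨hcolseq, hcolslen, hAlen, hArow, hBnd, hBoil, hBclosed, hvis⟩ := hinv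
  have hInb : pvInb n m (i, j) := ⟨hi, hin, hj, hjm⟩
  unfold pvBodyA pvBodyB
  by_cases hcell1 : pvCell land i j = 1
  case neg =>
    rw [if_neg (by simp [hcell1]), if_neg (by simp [hcell1])]
    exact hinv0
  case pos =>
  by_cases hseen : (i, j) ∈ stB.2
  · have hvtrue : pvVisGet stA.2 i j = true := (hvis _ hInb).mpr hseen
    rw [if_neg (by simp [hvtrue]), if_neg (by simp; exact fun _ => hseen)]
    exact hinv0
  · have hvfalse : pvVisGet stA.2 i j = false := by
      cases h : pvVisGet stA.2 i j
      · rfl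
      · exact absurd ((hvis (i, j) hInb).mp h) hseen
    rw [if_pos (by simp [hcell1, hvfalse]), if_pos (by simp [hcell1]; exact hseen)]
    show pvInv land n m
      ((pvBfsLoop land n m (n.toNat * m.toNat + 1) [(i, j)]
          (PySem.Set.add PySem.Set.empty j) 0 (pvVisSet stA.2 i j)).1.foldl
        (pvColsAdd (pvBfsLoop land n m (n.toNat * m.toNat + 1) [(i, j)]
          (PySem.Set.add PySem.Set.empty j) 0 (pvVisSet stA.2 i j)).2.1) stA.1,
       (pvBfsLoop land n m (n.toNat * m.toNat + 1) [(i, j)]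
          (PySem.Set.add PySem.Set.empty j) 0 (pvVisSet stA.2 i j)).2.2)
      ((PySem.Set.ofList ((pvComponent land n m (n.toNat * m.toNat + 1)
          (PySem.Set.add PySem.Set.empty (i, j))).map (fun p => p.2))).foldl
        (pvColsAdd (PySem.Set.len (pvComponent land n m (n.toNat * m.toNat + 1)
          (PySem.Set.add PySem.Set.empty (i, j))))) stB.1,
       PySem.Set.union stB.2 (pvComponent land n m (n.toNat * m.toNat + 1)
          (PySem.Set.add PySem.Set.empty (i, j))))
    set comp := pvComponent land n m (n.toNat * m.toNat + 1)
      (PySem.Set.add PySem.Set.empty (i, j)) with hcompdef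
    have hs0 : PySem.Set.add PySem.Set.empty (i, j) = [(i, j)] := by
      simp [PySem.Set.empty]
    have hs0oil : ∀ p ∈ PySem.Set.add PySem.Set.empty (i, j), pvOil land n m p := by
      rw [hs0]
      intro p hp
      rw [List.mem_singleton] at hp
      subst hp
      exact ⟨hInb, hcell1⟩
    have hs0nd : (PySem.Set.add PySem.Set.empty (i, j)).Nodup := by
      rw [hs0]; exact List.nodup_singleton _
    have hcompnd : comp.Nodup := pvComponent_nodup _ _ hs0nd
    have hcompoil : ∀ p ∈ comp, pvOil land n m p := pvComponent_oil _ _ hs0oil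
    have hstartcomp : (i, j) ∈ comp :=
      pvComponent_mem _ _ hs0oil _ (by rw [hs0]; exact List.mem_singleton_self _)
    have hfuel0 : n.toNat * m.toNat + 1 ≤
        (n.toNat * m.toNat + 1) + (PySem.Set.add PySem.Set.empty (i, j)).length := by omega
    have hcompclosed : pvClosed land n m (fun p => p ∈ comp) :=
      pvComponent_closed hs0nd hs0oil hfuel0
    have hcompmin : ∀ T : Int × Int → Prop, T (i, j) → pvClosed land n m T →
        ∀ p ∈ comp, T p := by
      intro T hT hTc
      refine pvComponent_subset hTc _ _ ?_
      rw [hs0]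
      intro p hp
      rw [List.mem_singleton] at hp
      subst hp
      exact hT
    have hcomplen : comp.length ≤ n.toNat * m.toNat :=
      length_le_grid hcompnd (fun p hp => (hcompoil p hp).1)
    classical
    have hKoil' : ∀ p ∈ comp.toFinset, pvOil land n m p :=
      fun p hp => hcompoil p (List.mem_toFinset.mp hp)
    have hKclosed' : pvClosed land n m (fun p => p ∈ comp.toFinset) := by
      intro p hp a hadj hoil
      exact List.mem_toFinset.mpr (hcompclosed p (List.mem_toFinset.mp hp) a hadj hoil)
    have hKmin' : ∀ T : Int × Int → Prop, T (i, j) → pvClosed land n m T →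
        ∀ p ∈ comp.toFinset, T p :=
      fun T hT hTc p hp => hcompmin T hT hTc p (List.mem_toFinset.mp hp)
    have hWK' : ∀ p ∈ comp.toFinset, ¬ p ∈ stB.2 := by
      have hT : ∀ p ∈ comp, p ∈ comp ∧ p ∉ stB.2 := by
        refine hcompmin _ ⟨hstartcomp, hseen⟩ ?_
        intro p hp a hadj hoil
        refine ⟨hcompclosed p hp.1 a hadj hoil, ?_⟩
        intro haB
        exact hp.2 (hBclosed a haB p (pvAdj_symm hadj) (hcompoil p hp.1))
      exact fun p hp => (hT p (List.mem_toFinset.mp hp)).2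
    obtain ⟨hl1, hrow1⟩ := pvVisSet_wf (n := n) (m := m) (v := stA.2) hInb hAlen hArow
    have hvis1 : ∀ p : Int × Int, pvInb n m p →
        (pvVisGet (pvVisSet stA.2 i j) p.1 p.2 = true ↔
          (p ∈ stB.2 ∨ p ∈ ({(i, j)} : Finset (Int × Int)))) := by
      rintro ⟨x, y⟩ hp
      by_cases hpa : (x, y) = ((i : Int), (j : Int))
      · obtain ⟨hx, hy⟩ := Prod.mk.injEq .. ▸ hpa
        subst hx
        subst hy
        simp only
        rw [pvVisGet_set_self hInb hAlen hArow]
        simp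
      · simp only
        rw [pvVisGet_set_other (n := n) (m := m) hInb hp hpa hAlen]
        rw [hvis (x, y) hp]
        simp [Finset.mem_singleton, hpa]
    have hsj : PySem.Set.add PySem.Set.empty j = [j] := by
      simp [PySem.Set.empty]
    obtain ⟨hcntR, hcolsndR, hcolsmR, hlenR, hrowR, hvisR⟩ :=
      pvBfsLoop_spec land n m comp.toFinset (fun p => p ∈ stB.2) (i, j)
        hKclosed' hKmin' hBclosed hWK'
        (n.toNat * m.toNat + 1) [(i, j)] (PySem.Set.add PySem.Set.empty j) 0
        (pvVisSet stA.2 i j) {(i, j)}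
        (by
          intro p hp
          rw [Finset.mem_singleton] at hp
          subst hp
          exact List.mem_toFinset.mpr hstartcomp)
        (Finset.mem_singleton_self _)
        (by
          intro p hp
          rw [List.mem_singleton] at hp
          subst hp
          exact Finset.mem_singleton_self _)
        (List.nodup_singleton _)
        (by
          intro p hp hnp
          exfalso
          rw [Finset.mem_singleton] at hp
          subst hp
          exact hnp (List.mem_singleton_self _))
        hvis1 hl1 hrow1
        (by simp)
        (by rw [hsj]; exact List.nodup_singleton _)
        (by
          intro x
          rw [hsj]
          constructor
          · intro hx
            rw [List.mem_singleton] at hx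
            exact ⟨(i, j), Finset.mem_singleton_self _, hx.symm⟩
          · rintro ⟨p, hp, hpx⟩
            rw [Finset.mem_singleton] at hp
            subst hp
            rw [List.mem_singleton]
            exact hpx.symm)
        (by
          rw [List.toFinset_card_of_nodup hcompnd]
          simp only [List.length_singleton, Finset.card_singleton]
          omega)
    have hbound : ∀ x ∈ (pvBfsLoop land n m (n.toNat * m.toNat + 1) [(i, j)]
        (PySem.Set.add PySem.Set.empty j) 0 (pvVisSet stA.2 i j)).1,
        0 ≤ x ∧ x < (stA.1.length : Int) := by
      intro x hx
      obtain ⟨p, hpK, hpx⟩ := (hcolsmR x).mp hx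
      obtain ⟨⟨hb1, hb2, hb3, hb4⟩, _⟩ := hKoil' p hpK
      rw [hcolslen]
      constructor <;> omega
    have hsize : PySem.Set.len comp = ((comp.toFinset.card : Nat) : Int) := by
      rw [pvSetLen, List.toFinset_card_of_nodup hcompnd]
    refine ⟨?_, ?_, hlenR, hrowR, ?_, ?_, ?_, ?_⟩
    · -- the two columns updates agree
      rw [hcntR, hsize, ← hcolseq]
      refine pvColsFold_eq _ _ _ hcolsndR (PySem.Set.nodup_ofList _) ?_ stA.1 ?_
      · intro x
        rw [hcolsmR x, PySem.Set.mem_ofList, List.mem_map]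
        constructor
        · rintro ⟨p, hpK, hpx⟩
          exact ⟨p, List.mem_toFinset.mp hpK, hpx⟩
        · rintro ⟨p, hpc, hpx⟩
          exact ⟨p, List.mem_toFinset.mpr hpc, hpx⟩
      · intro x hx
        obtain ⟨p, hpK, hpx⟩ := (hcolsmR x).mp hx
        obtain ⟨⟨hb1, hb2, hb3, hb4⟩, _⟩ := hKoil' p hpK
        rw [hcolslen]
        constructor <;> omega
    · rw [(pvColsFold_spec _ _ hcolsndR stA.1 hbound).1]
      exact hcolslen
    · exact PySem.Set.nodup_union _ _ hBnd
    · intro p hp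
      rcases (PySem.Set.mem_union _ _ _).mp hp with h | h
      · exact hBoil p h
      · exact hcompoil p h
    · intro p hp a hadj hoil
      rcases (PySem.Set.mem_union _ _ _).mp hp with h | h
      · exact (PySem.Set.mem_union _ _ _).mpr (Or.inl (hBclosed p h a hadj hoil))
      · exact (PySem.Set.mem_union _ _ _).mpr (Or.inr (hcompclosed p h a hadj hoil))
    · intro p hp
      rw [hvisR p hp]
      simp [PySem.Set.mem_union, List.mem_toFinset]

theorem pvFold_inv (land : List (List Int)) (n m : Int) :
    ∀ (is : List Int), (∀ i ∈ is, 0 ≤ i ∧ i < n) →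
      ∀ {stA : List Int × List (List Bool)} {stB : List Int × PySem.Set (Int × Int)},
        pvInv land n m stA stB →
        pvInv land n m
          (is.foldl (fun st i =>
            (PySem.List.pyRange 0 m 1).foldl (fun st j => pvBodyA land n m st i j) st) stA)
          (is.foldl (fun st i =>
            (PySem.List.pyRange 0 m 1).foldl (fun st j => pvBodyB land n m st i j) st) stB) := by
  intro is
  induction is with
  | nil => intro _ stA stB h; simpa using h
  | cons i is ih =>
    intro hb stA stB h
    rw [List.foldl_cons, List.foldl_cons]
    refine ih (fun x hx => hb x (List.mem_cons_of_mem _ hx)) ?_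
    have hone := hb i (List.mem_cons_self ..)
    have hrowstep : ∀ (js : List Int), (∀ j ∈ js, 0 ≤ j ∧ j < m) →
        ∀ {sA : List Int × List (List Bool)} {sB : List Int × PySem.Set (Int × Int)},
          pvInv land n m sA sB →
          pvInv land n m (js.foldl (fun st j => pvBodyA land n m st i j) sA)
            (js.foldl (fun st j => pvBodyB land n m st i j) sB) := by
      intro js
      induction js with
      | nil => intro _ sA sB hh; simpa using hh
      | cons j js ihj =>
        intro hbj sA sB hh
        rw [List.foldl_cons, List.foldl_cons]
        exact ihj (fun x hx => hbj x (List.mem_cons_of_mem _ hx))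
          (pvStep_inv land n m hh hone.1 hone.2 (hbj j (List.mem_cons_self ..)).1
            (hbj j (List.mem_cons_self ..)).2)
    refine hrowstep _ ?_ h
    intro j hj
    have := PySem.List.mem_pyRange_one.mp hj
    exact ⟨this.1, this.2⟩

theorem solution_eq (land : List (List Int)) : solution land = solution_alt land := by
  simp only [solution, solution_alt]
  have hinit : pvInv land (PySem.List.len land)
      (PySem.List.len (PySem.List.pyGetD land 0 []))
      (List.replicate (PySem.List.len (PySem.List.pyGetD land 0 [])).toNat 0,
       List.replicate (PySem.List.len land).toNat
         (List.replicate (PySem.List.len (PySem.List.pyGetD land 0 [])).toNat false))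
      (List.replicate (PySem.List.len (PySem.List.pyGetD land 0 [])).toNat 0,
       PySem.Set.empty) := by
    refine ⟨rfl, List.length_replicate, List.length_replicate, ?_, List.nodup_nil, ?_, ?_, ?_⟩
    · intro row hrowm
      rw [List.eq_of_mem_replicate hrowm]
      exact List.length_replicate
    · intro p hp
      exact absurd hp (List.not_mem_nil)
    · intro p hp
      exact absurd hp (List.not_mem_nil)
    · rintro ⟨p1, p2⟩ hp
      obtain ⟨h1, h2, h3, h4⟩ := hp
      simp only at h1 h2 h3 h4
      constructor
      · intro hv
        exfalso
        rw [pvVisGet_getD h1 h3,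
          List.getD_replicate _ (show p1.toNat < (PySem.List.len land).toNat by omega),
          List.getD_replicate _ (show p2.toNat <
            (PySem.List.len (PySem.List.pyGetD land 0 [])).toNat by omega)] at hv
        cases hv
      · intro hmem
        exact absurd hmem (List.not_mem_nil)
  have hmain := pvFold_inv land (PySem.List.len land)
    (PySem.List.pyGetD land 0 [] |> PySem.List.len)
    (PySem.List.pyRange 0 (PySem.List.len land) 1)
    (fun i hi => by
      have := PySem.List.mem_pyRange_one.mp hi
      exact ⟨this.1, this.2⟩) hinit
  rw [hmain.1]

-- ===== VERDICT (by name: the statement is the Claim_ definition above) =====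
theorem solution_spec : Claim_equal_solution := by
  intro land _ _
  unfold Spec_solution
  exact solution_eq land
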